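-- pv_equiv track=rewrite | github.com/michellejimenez/BINF6200 | JimenezM_Assignment4.py | find_parent_terms
-- ===== SOURCE A (Python) =====
-- def find_parent_terms(go_id, go_dict):
--     """
--     Find and return all direct and indirect parents of a given GO ID based on a mapping dictionary.
--
--     Arguments:
--         go_id(str): A string containing a single GO ID.
--         go_dict(dict): A dictionary where each key is a GO ID and each value is a list of GO IDs that                   represents the key's parents.
--
--     Returns:
--         A set containing all direct and indirect parents of `go_id` based on is_a relationships.
--     """
--     parent_terms = set()
--     try:
--         direct_parents = go_dict[go_id]
--     except KeyError:
--         # If there are no parents then return the empty set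
--         return parent_terms
--
--     for parent_id in direct_parents:
--         parent_terms.add(parent_id)
--         parent_terms.update(find_parent_terms(parent_id, go_dict))
--     return parent_terms
-- ===== SOURCE B (Python) =====
-- def find_parent_terms(go_id, go_dict):
--     """
--     Memoized re-implementation: the ancestor set of every GO term is computed
--     once and cached, instead of re-exploring every path through the DAG.
--     """
--     memo = {}
--
--     def ancestors(node):
--         if node in memo:
--             return memo[node]
--         result = set()
--         for parent_id in go_dict.get(node, []):
--             result.add(parent_id)
--             result.update(ancestors(parent_id))
--         memo[node] = result
--         return result
--
--     return ancestors(go_id)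
-- ===== Notes on version B (the rewrite author's own statement) =====
-- stated objective: alternative
-- what changed: B caches the ancestor set of every GO term in a memo dictionary (dynamic programming), so each node is expanded at most once, instead of A's plain recursion that recomputes the whole ancestor set of a node for every path reaching it.
import Mathlib
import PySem

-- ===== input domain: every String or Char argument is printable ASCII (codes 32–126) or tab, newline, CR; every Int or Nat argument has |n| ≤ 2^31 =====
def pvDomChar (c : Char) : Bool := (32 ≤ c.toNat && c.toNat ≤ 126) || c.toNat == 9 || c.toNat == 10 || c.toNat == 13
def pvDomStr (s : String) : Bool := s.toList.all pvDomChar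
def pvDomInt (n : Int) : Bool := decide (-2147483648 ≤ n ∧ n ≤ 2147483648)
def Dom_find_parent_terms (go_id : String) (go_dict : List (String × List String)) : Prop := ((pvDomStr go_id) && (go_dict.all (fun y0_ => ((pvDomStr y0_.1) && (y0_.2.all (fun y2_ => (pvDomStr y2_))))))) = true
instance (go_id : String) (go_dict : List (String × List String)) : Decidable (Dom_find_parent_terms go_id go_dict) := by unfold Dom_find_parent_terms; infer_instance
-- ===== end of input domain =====

-- B replaces A's path-by-path recursion by a memoized (dynamic-programming) traversal that
-- computes each GO term's ancestor set at most once; same result on every input where A terminates.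


-- ===== PORT A =====
-- A recomputes a node's ancestors for every path reaching it; the fuel `go_dict.length + 1` bounds the recursion
-- depth, which under Pre_ (no cycle reachable from go_id) never exceeds the number of
-- distinct keys plus one, so the fuel-exhausted branch is never taken on admitted inputs.
def pvGoA (go_dict : List (String × List String)) : Nat → String → List String
  | 0, _ => PySem.Set.empty
  | Nat.succ fuel, go_id =>
    match (PySem.Dict.mk go_dict).get? go_id with
    | none => PySem.Set.empty
    | some direct_parents =>
      direct_parents.foldl
        (fun parent_terms parent_id =>
          PySem.Set.update (PySem.Set.add parent_terms parent_id)
            (pvGoA go_dict fuel parent_id))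
        PySem.Set.empty

def find_parent_terms (go_id : String) (go_dict : List (String × List String)) : List String :=
  pvGoA go_dict (go_dict.length + 1) go_id

-- ===== PORT B =====
-- Memoized traversal: `ancestors` checks the memo dict first, otherwise folds over the
-- direct parents threading the memo through the recursive calls, then records its result.
-- Same fuel bound as A's port; the fuel-exhausted branch is unreachable under Pre_.
def pvAncestors (go_dict : List (String × List String)) :
    Nat → String → PySem.Dict String (List String) →
    List String × PySem.Dict String (List String)
  | fuel, node, memo =>
    match memo.get? node with
    | some v => (v, memo)
    | none =>
      match fuel with
      | 0 => (PySem.Set.empty, memo)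
      | Nat.succ fuel =>
        let st := (((PySem.Dict.mk go_dict).get? node).getD []).foldl
          (fun (st : List String × PySem.Dict String (List String)) parent_id =>
            let rm := pvAncestors go_dict fuel parent_id st.2
            (PySem.Set.update (PySem.Set.add st.1 parent_id) rm.1, rm.2))
          (PySem.Set.empty, memo)
        (st.1, st.2.insert node st.1)

def find_parent_terms_alt (go_id : String) (go_dict : List (String × List String)) : List String :=
  (pvAncestors go_dict (go_dict.length + 1) go_id PySem.Dict.empty).1

-- ===== PRECONDITION & SPEC =====
-- Parent lookup of the is_a graph (first match, Python dict semantics).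
def pvParents (go_dict : List (String × List String)) (x : String) : List String :=
  ((PySem.Dict.mk go_dict).get? x).getD []

-- One round of transitive-closure expansion of a node set by the parent relation.
def pvStep (go_dict : List (String × List String)) (s : List String) : List String :=
  PySem.Set.update s (s.flatMap (pvParents go_dict))

-- All (direct and indirect) parents of x: the expansion iterated to saturation
-- (one more round than the number of distinct candidate nodes).
def pvReach (go_dict : List (String × List String)) (x : String) : List String :=
  (pvStep go_dict)^[(PySem.List.dedup (go_dict.flatMap (·.2))).length + 1]
    (PySem.Set.ofList (pvParents go_dict x))

-- Pre_ excludes exactly the inputs on which Python A never returns (RecursionError):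
-- those where some GO term reachable from go_id is its own (indirect) parent.
def Pre_find_parent_terms (go_id : String) (go_dict : List (String × List String)) : Prop :=
  ∀ x ∈ go_id :: pvReach go_dict go_id, x ∉ pvReach go_dict x

instance (go_id : String) (go_dict : List (String × List String)) :
    Decidable (Pre_find_parent_terms go_id go_dict) := by
  unfold Pre_find_parent_terms; infer_instance

def pvWitness_find_parent_terms : String × (List (String × List String)) :=
  ("GO:0000001", [("GO:0000001", ["GO:0000002", "GO:0000003"]), ("GO:0000002", ["GO:0000003"])])

def Spec_find_parent_terms (go_id : String) (go_dict : List (String × List String)) (out : List String) : Prop := out = find_parent_terms_alt go_id go_dict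
instance (go_id : String) (go_dict : List (String × List String)) (out : List String) : Decidable (Spec_find_parent_terms go_id go_dict out) := by unfold Spec_find_parent_terms; infer_instance

-- ===== CLAIM (what is proved, stated in full; the proofs are below) =====
def Claim_equal_find_parent_terms : Prop := ∀ (go_id : String) (go_dict : List (String × List String)), Dom_find_parent_terms go_id go_dict → Pre_find_parent_terms go_id go_dict → Spec_find_parent_terms go_id go_dict (find_parent_terms go_id go_dict)

-- ===== LEMMAS AND PROOFS =====

theorem pvParents_subset (d : List (String × List String)) (x : String) :
    pvParents d x ⊆ d.flatMap (·.2) := by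
  unfold pvParents
  cases h : (PySem.Dict.mk d).get? x with
  | none => simp
  | some ps =>
    have hm := PySem.Dict.mem_items_of_get?_eq_some _ h
    intro a ha
    simp only [Option.getD_some] at ha
    exact List.mem_flatMap.mpr ⟨(x, ps), hm, ha⟩

theorem pvKey_of_parents_ne_nil (d : List (String × List String)) (x : String)
    (h : pvParents d x ≠ []) : x ∈ PySem.List.dedup (d.map Prod.fst) := by
  unfold pvParents at h
  cases hg : (PySem.Dict.mk d).get? x with
  | none => simp [hg] at h
  | some ps =>
    have hm := PySem.Dict.mem_items_of_get?_eq_some _ hg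
    rw [PySem.List.mem_dedup]
    exact List.mem_map.mpr ⟨(x, ps), hm, rfl⟩

theorem pvSubset_step (d : List (String × List String)) (s : List String) :
    s ⊆ pvStep d s := by
  intro y hy
  exact (PySem.Set.mem_update _ _ _).mpr (Or.inl hy)

theorem pvSubset_iterate (d : List (String × List String)) (n : Nat) (s : List String) :
    s ⊆ (pvStep d)^[n] s := by
  induction n with
  | zero => simp
  | succ n ih =>
    rw [Function.iterate_succ_apply']
    exact fun y hy => pvSubset_step d _ (ih hy)

theorem pvStep_mem (d : List (String × List String)) (s : List String) (y : String)
    (h : y ∈ pvStep d s) : y ∈ s ∨ ∃ x ∈ s, y ∈ pvParents d x := by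
  rcases (PySem.Set.mem_update _ _ _).mp h with h | h
  · exact Or.inl h
  · exact Or.inr (List.mem_flatMap.mp h)

theorem pvStep_fix_iterate (d : List (String × List String)) (s : List String)
    (h : pvStep d s = s) (k : Nat) : (pvStep d)^[k] s = s := by
  induction k with
  | zero => rfl
  | succ k ih => rw [Function.iterate_succ_apply', ih, h]

-- iterates are Nodup and inside the universe of all value entries
theorem pvIter_nodup (d : List (String × List String)) (a : String) (n : Nat) :
    ((pvStep d)^[n] (PySem.Set.ofList (pvParents d a))).Nodup := by
  induction n with
  | zero => exact PySem.Set.nodup_ofList _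
  | succ n ih =>
    rw [Function.iterate_succ_apply']
    exact PySem.Set.nodup_update _ _ ih

theorem pvIter_subset_univ (d : List (String × List String)) (a : String) (n : Nat) :
    ((pvStep d)^[n] (PySem.Set.ofList (pvParents d a))) ⊆ d.flatMap (·.2) := by
  induction n with
  | zero =>
    intro y hy
    exact pvParents_subset d a ((PySem.Set.mem_ofList _ _).mp hy)
  | succ n ih =>
    rw [Function.iterate_succ_apply']
    intro y hy
    rcases pvStep_mem d _ y hy with h | ⟨x, hx, hyx⟩
    · exact ih h
    · exact pvParents_subset d x hyx

theorem pvStep_growth (d : List (String × List String)) (s : List String) :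
    pvStep d s = s ∨ s.length < (pvStep d s).length := by
  unfold pvStep
  rw [PySem.Set.update_eq_append_filter]
  cases h : List.filter (fun y => !PySem.Set.contains s y)
      (PySem.Set.ofList (s.flatMap (pvParents d))) with
  | nil => left; simp
  | cons z t => right; simp [List.length_append]

theorem pvReach_saturated (d : List (String × List String)) (a : String) :
    pvStep d (pvReach d a) = pvReach d a := by
  by_contra hne
  set B := (PySem.List.dedup (d.flatMap (·.2))).length with hB
  set S0 := PySem.Set.ofList (pvParents d a) with hS0
  -- no iterate up to B+1 is a fixpoint
  have hnofix : ∀ i, i ≤ B + 1 → pvStep d ((pvStep d)^[i] S0) ≠ (pvStep d)^[i] S0 := by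
    intro i hi hfix
    apply hne
    have : (pvStep d)^[B + 1] S0 = (pvStep d)^[i] S0 := by
      have : B + 1 = (B + 1 - i) + i := by omega
      rw [this, Function.iterate_add_apply, pvStep_fix_iterate d _ hfix]
    unfold pvReach
    rw [← hB, ← hS0, this]
    exact hfix
  -- so sizes grow at least linearly
  have hgrow : ∀ i, i ≤ B + 1 → i ≤ ((pvStep d)^[i] S0).length := by
    intro i
    induction i with
    | zero => omega
    | succ i ih =>
      intro hi
      have h1 := ih (by omega)
      rcases pvStep_growth d ((pvStep d)^[i] S0) with h | h
      · exact absurd h (hnofix i (by omega))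
      · rw [Function.iterate_succ_apply']
        omega
  -- but every iterate fits inside the deduplicated universe
  have hle : ((pvStep d)^[B + 1] S0).length ≤ B := by
    have hsub : ((pvStep d)^[B + 1] S0) ⊆ PySem.List.dedup (d.flatMap (·.2)) := by
      intro y hy
      exact (PySem.List.mem_dedup _ _).mpr (pvIter_subset_univ d a (B + 1) hy)
    exact ((pvIter_nodup d a (B + 1)).subperm hsub).length_le
  have := hgrow (B + 1) (le_refl _)
  omega

theorem pvReach_closed (d : List (String × List String)) (a x : String)
    (hx : x ∈ pvReach d a) : pvParents d x ⊆ pvReach d a := by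
  intro p hp
  have : p ∈ pvStep d (pvReach d a) :=
    (PySem.Set.mem_update _ _ _).mpr (Or.inr (List.mem_flatMap.mpr ⟨x, hx, hp⟩))
  rwa [pvReach_saturated] at this

theorem pvParents_subset_reach (d : List (String × List String)) (a : String) :
    pvParents d a ⊆ pvReach d a := by
  intro p hp
  exact pvSubset_iterate d _ _ ((PySem.Set.mem_ofList _ _).mpr hp)

theorem pvReach_trans (d : List (String × List String)) (a b : String)
    (hb : b ∈ pvReach d a) : pvReach d b ⊆ pvReach d a := by
  have aux : ∀ n (s : List String), s ⊆ pvReach d a →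
      (pvStep d)^[n] s ⊆ pvReach d a := by
    intro n
    induction n with
    | zero => intro s hs; simpa using hs
    | succ n ih =>
      intro s hs
      rw [Function.iterate_succ_apply]
      apply ih
      intro y hy
      rcases (PySem.Set.mem_update _ _ _).mp hy with h | h
      · exact hs h
      · rcases List.mem_flatMap.mp h with ⟨x, hx, hyx⟩
        exact pvReach_closed d a x (hs hx) hyx
  apply aux
  intro p hp
  exact pvReach_closed d a b hb ((PySem.Set.mem_ofList _ _).mp hp)

-- measure for the fuel arguments: the number of distinct keys not yet on the path
def pvM (d : List (String × List String)) (avoid : List String) : Nat :=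
  ((PySem.List.dedup (d.map Prod.fst)).filter (fun k => !avoid.contains k)).length

theorem pvM_lt (d : List (String × List String)) (avoid : List String) (x : String)
    (hx : x ∈ PySem.List.dedup (d.map Prod.fst)) (hxa : x ∉ avoid) :
    pvM d (x :: avoid) < pvM d avoid := by
  unfold pvM
  have hpt : ∀ k : String, (!(x :: avoid).contains k) =
      ((!(k == x)) && (!avoid.contains k)) := by
    intro k
    simp [Bool.not_or, Bool.beq_eq_decide_eq]
  calc ((PySem.List.dedup (d.map Prod.fst)).filter (fun k => !(x :: avoid).contains k)).length
      = (((PySem.List.dedup (d.map Prod.fst)).filter (fun k => !(k == x))).filter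
          (fun k => !avoid.contains k)).length := by
        rw [List.filter_filter]
        exact congrArg _ (List.filter_congr (fun k _ => (hpt k).trans (Bool.and_comm _ _)))
    _ = (((PySem.List.dedup (d.map Prod.fst)).filter (fun k => !avoid.contains k)).filter
          (fun k => !(k == x))).length := by
        rw [List.filter_filter, List.filter_filter]
        exact congrArg _ (List.filter_congr (fun k _ => Bool.and_comm _ _))
    _ < ((PySem.List.dedup (d.map Prod.fst)).filter (fun k => !avoid.contains k)).length := by
        apply List.length_filter_lt_length_iff_exists.mpr
        refine ⟨x, List.mem_filter.mpr ⟨hx, by simpa using hxa⟩, by simp⟩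

theorem pvM_nil_le (d : List (String × List String)) : pvM d [] ≤ d.length := by
  unfold pvM
  calc _ ≤ (PySem.List.dedup (d.map Prod.fst)).length := List.length_filter_le _ _
    _ ≤ (d.map Prod.fst).length := by
        simpa using PySem.Set.length_ofList_le (d.map Prod.fst)
    _ = d.length := List.length_map ..

theorem pvGoA_succ (d : List (String × List String)) (f : Nat) (id : String) :
    pvGoA d (Nat.succ f) id =
      (pvParents d id).foldl
        (fun acc p => PySem.Set.update (PySem.Set.add acc p) (pvGoA d f p))
        PySem.Set.empty := by
  show (match (PySem.Dict.mk d).get? id with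
    | none => PySem.Set.empty
    | some direct_parents =>
      direct_parents.foldl
        (fun acc p => PySem.Set.update (PySem.Set.add acc p) (pvGoA d f p))
        PySem.Set.empty) = _
  unfold pvParents
  cases (PySem.Dict.mk d).get? id with
  | none => rfl
  | some ps => rfl

-- the facts about a direct parent p of id used by both inductions below
theorem pvChild_root (d : List (String × List String)) (root id p : String)
    (hroot : id = root ∨ id ∈ pvReach d root) (hp : p ∈ pvParents d id) :
    p = root ∨ p ∈ pvReach d root := by
  rcases hroot with h | h
  · exact Or.inr (pvParents_subset_reach d root (h ▸ hp))
  · exact Or.inr (pvReach_closed d root id h hp)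

theorem pvChild_avoid (d : List (String × List String)) (root id p : String)
    (avoid : List String)
    (hpre : ∀ x, (x = root ∨ x ∈ pvReach d root) → x ∉ pvReach d x)
    (hroot : id = root ∨ id ∈ pvReach d root)
    (havoid : ∀ s ∈ avoid, ¬(s = id ∨ s ∈ pvReach d id))
    (hp : p ∈ pvParents d id) :
    ∀ s ∈ id :: avoid, ¬(s = p ∨ s ∈ pvReach d p) := by
  have hedge : p ∈ pvReach d id := pvParents_subset_reach d id hp
  have hacyc : id ∉ pvReach d id := hpre id hroot
  intro s hs hbad
  rcases List.mem_cons.mp hs with rfl | hs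
  · rcases hbad with rfl | hbad
    · exact hacyc hedge
    · exact hacyc (pvReach_trans d s p hedge hbad)
  · rcases hbad with rfl | hbad
    · exact havoid s hs (Or.inr hedge)
    · exact havoid s hs (Or.inr (pvReach_trans d id p hedge hbad))

theorem pvId_not_mem_avoid (d : List (String × List String)) (id : String)
    (avoid : List String)
    (havoid : ∀ s ∈ avoid, ¬(s = id ∨ s ∈ pvReach d id)) : id ∉ avoid := by
  intro h
  exact havoid id h (Or.inl rfl)

-- A's value does not depend on the fuel, as long as the fuel exceeds the number of
-- distinct keys not on the current (necessarily cycle-free) path.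
theorem pvGoA_stable (d : List (String × List String)) (root : String)
    (hpre : ∀ x, (x = root ∨ x ∈ pvReach d root) → x ∉ pvReach d x) :
    ∀ f g avoid id, (id = root ∨ id ∈ pvReach d root) →
      (∀ s ∈ avoid, ¬(s = id ∨ s ∈ pvReach d id)) →
      pvM d avoid < f → pvM d avoid < g →
      pvGoA d f id = pvGoA d g id := by
  intro f
  induction f with
  | zero => intro g avoid id _ _ hf _; omega
  | succ f ih =>
    intro g avoid id hroot havoid hf hg
    cases g with
    | zero => omega
    | succ g =>
      rw [pvGoA_succ, pvGoA_succ]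
      by_cases hnil : pvParents d id = []
      · rw [hnil]; rfl
      · have hkey := pvKey_of_parents_ne_nil d id hnil
        have hidav := pvId_not_mem_avoid d id avoid havoid
        have hm := pvM_lt d avoid id hkey hidav
        apply PySem.List.foldl_congr_mem
        intro acc p hp
        rw [ih g (id :: avoid) p (pvChild_root d root id p hroot hp)
          (pvChild_avoid d root id p avoid hpre hroot havoid hp)
          (by omega) (by omega)]

-- memo invariant: every cached set is the (fuel-independent) value of A's recursion
def pvINV (d : List (String × List String)) (memo : PySem.Dict String (List String)) : Prop :=
  ∀ k v, memo.get? k = some v → v = pvGoA d (d.length + 1) k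

-- memoization correctness: B's traversal returns A's value and preserves the invariant
theorem pvML (d : List (String × List String)) (root : String)
    (hpre : ∀ x, (x = root ∨ x ∈ pvReach d root) → x ∉ pvReach d x) :
    ∀ f avoid node memo, (node = root ∨ node ∈ pvReach d root) →
      (∀ s ∈ avoid, ¬(s = node ∨ s ∈ pvReach d node)) →
      pvM d avoid < f → f ≤ d.length + 1 → pvINV d memo →
      (pvAncestors d f node memo).1 = pvGoA d (d.length + 1) node ∧
        pvINV d (pvAncestors d f node memo).2 := by
  intro f
  induction f with
  | zero => intro avoid node memo _ _ hfm _ _; omega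
  | succ f ih =>
    intro avoid node memo hroot havoid hfm hfle hinv
    cases hm : memo.get? node with
    | some v =>
      have hred : pvAncestors d (f + 1) node memo = (v, memo) := by
        rw [pvAncestors, hm]
      rw [hred]
      exact ⟨hinv node v hm, hinv⟩
    | none =>
      have hred : pvAncestors d (f + 1) node memo =
          (((pvParents d node).foldl
              (fun (st : List String × PySem.Dict String (List String)) parent_id =>
                let rm := pvAncestors d f parent_id st.2
                (PySem.Set.update (PySem.Set.add st.1 parent_id) rm.1, rm.2))
              (PySem.Set.empty, memo)).1,
           ((pvParents d node).foldl
              (fun (st : List String × PySem.Dict String (List String)) parent_id =>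
                let rm := pvAncestors d f parent_id st.2
                (PySem.Set.update (PySem.Set.add st.1 parent_id) rm.1, rm.2))
              (PySem.Set.empty, memo)).2.insert node
             ((pvParents d node).foldl
              (fun (st : List String × PySem.Dict String (List String)) parent_id =>
                let rm := pvAncestors d f parent_id st.2
                (PySem.Set.update (PySem.Set.add st.1 parent_id) rm.1, rm.2))
              (PySem.Set.empty, memo)).1) := by
        rw [pvAncestors, hm]
        rfl
      rw [hred]
      -- the fold lemma: processing a sublist of node's direct parents matches A's fold
      have FL : ∀ ps : List String, (∀ p ∈ ps, p ∈ pvParents d node) →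
          ∀ (acc : List String) (memo₀ : PySem.Dict String (List String)), pvINV d memo₀ →
          (ps.foldl
              (fun (st : List String × PySem.Dict String (List String)) parent_id =>
                let rm := pvAncestors d f parent_id st.2
                (PySem.Set.update (PySem.Set.add st.1 parent_id) rm.1, rm.2))
              (acc, memo₀)).1 =
            ps.foldl (fun acc p => PySem.Set.update (PySem.Set.add acc p) (pvGoA d d.length p)) acc ∧
          pvINV d (ps.foldl
              (fun (st : List String × PySem.Dict String (List String)) parent_id =>
                let rm := pvAncestors d f parent_id st.2
                (PySem.Set.update (PySem.Set.add st.1 parent_id) rm.1, rm.2))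
              (acc, memo₀)).2 := by
        intro ps
        induction ps with
        | nil => intro _ acc memo₀ hinv₀; exact ⟨rfl, hinv₀⟩
        | cons p ps ihps =>
          intro hsub acc memo₀ hinv₀
          have hp : p ∈ pvParents d node := hsub p (List.mem_cons_self ..)
          have hnil : pvParents d node ≠ [] := List.ne_nil_of_mem hp
          have hkey := pvKey_of_parents_ne_nil d node hnil
          have hnav := pvId_not_mem_avoid d node avoid havoid
          have hmlt := pvM_lt d avoid node hkey hnav
          have hcr := pvChild_root d root node p hroot hp
          have hca := pvChild_avoid d root node p avoid hpre hroot havoid hp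
          have h1 := ih (node :: avoid) p memo₀ hcr hca (by omega) (by omega) hinv₀
          have hstab : pvGoA d (d.length + 1) p = pvGoA d d.length p :=
            pvGoA_stable d root hpre (d.length + 1) d.length (node :: avoid) p hcr hca
              (by omega) (by omega)
          simp only [List.foldl_cons]
          have hfst : (pvAncestors d f p memo₀).1 = pvGoA d d.length p := h1.1.trans hstab
          rw [hfst]
          exact ihps (fun q hq => hsub q (List.mem_cons_of_mem _ hq)) _ _ h1.2
      have hFL := FL (pvParents d node) (fun p hp => hp) PySem.Set.empty memo hinv
      constructor
      · simpa [pvGoA_succ d d.length node] using hFL.1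
      · intro k v hk
        simp only at hk
        rw [PySem.Dict.get?_insert] at hk
        split_ifs at hk with hkn
        · cases hk
          subst hkn
          simpa [pvGoA_succ d d.length k] using hFL.1
        · exact hFL.2 k v hk

-- ===== VERDICT (by name: the statement is the Claim_ definition above) =====
theorem find_parent_terms_spec : Claim_equal_find_parent_terms := by
  intro go_id go_dict _hdom hpre
  unfold Spec_find_parent_terms find_parent_terms find_parent_terms_alt
  have hpre' : ∀ x, (x = go_id ∨ x ∈ pvReach go_dict go_id) → x ∉ pvReach go_dict x := by
    intro x hx
    exact hpre x (by simpa using hx)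
  have h := pvML go_dict go_id hpre' (go_dict.length + 1) [] go_id PySem.Dict.empty
    (Or.inl rfl) (by simp)
    (by have := pvM_nil_le go_dict; omega) (le_refl _)
    (by intro k v h; simp [PySem.Dict.get?_empty] at h)
  exact h.1.symm
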